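-- pv_equiv track=rewrite | github.com/rockstor/rockstor-core | src/rockstor/storageadmin/views/rockon.py | _sorted_keys
-- ===== SOURCE A (Python) =====
-- def _sorted_keys(cd):
--     sorted_keys = [""] * len(cd.keys())
--     for k in cd:
--         ccd = cd[k]
--         idx = ccd.get("index", 0)
--         if idx == 0:
--             for i in range(len(sorted_keys)):
--                 if sorted_keys[i] == "":
--                     sorted_keys[i] = k
--                     break
--         else:
--             sorted_keys[idx - 1] = k
--     return sorted_keys
-- ===== SOURCE B (Python) =====
-- def _sorted_keys(cd):
--     n = len(cd)
--     slots = [""] * n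
--     free = 0  # every slot left of `free` is filled
--     for k, ccd in cd.items():
--         idx = ccd.get("index", 0)
--         if idx == 0:
--             while slots[free] != "":
--                 free += 1
--             slots[free] = k
--             free += 1
--         else:
--             slots[idx - 1] = k
--     return slots
-- ===== Notes on version B (the rewrite author's own statement) =====
-- stated objective: faster
-- what changed: A rescans the slot array from position 0 for every key without an explicit index; B keeps a forward-moving first-free pointer so each placement is amortized O(1). Pre_ excludes dicts with the empty-string key, where the key collides with the empty-slot sentinel and both placements are accidental, and duplicate-key association lists, which do not model a Python dict.
-- outside the precondition, e.g. on _sorted_keys({'': {}, 'a': {}}): A returns ['a', ''], B returns ['', 'a']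
import Mathlib
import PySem

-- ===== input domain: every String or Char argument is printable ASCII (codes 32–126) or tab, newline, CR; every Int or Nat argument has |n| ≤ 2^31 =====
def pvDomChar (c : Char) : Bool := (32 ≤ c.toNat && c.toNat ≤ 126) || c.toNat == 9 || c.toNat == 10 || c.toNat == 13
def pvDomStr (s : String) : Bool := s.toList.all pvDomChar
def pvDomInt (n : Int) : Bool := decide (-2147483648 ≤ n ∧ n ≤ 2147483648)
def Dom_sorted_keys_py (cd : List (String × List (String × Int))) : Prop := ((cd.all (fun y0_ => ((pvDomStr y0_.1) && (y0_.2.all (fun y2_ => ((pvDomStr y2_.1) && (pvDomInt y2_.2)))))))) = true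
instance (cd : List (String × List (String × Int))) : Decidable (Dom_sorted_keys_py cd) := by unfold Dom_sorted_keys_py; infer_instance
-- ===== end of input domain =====

-- B replaces A's restart-from-zero scan for the first empty slot by a forward-moving
-- first-free pointer: amortized one pass instead of a quadratic rescan.

-- ===== PORT A =====
-- inner loop: `for i in range(len(sorted_keys)): if sorted_keys[i] == "": sorted_keys[i] = k; break`
def pvPlaceFirstEmpty (slots : List String) (k : String) : List String :=
  match slots with
  | [] => []
  | s :: rest => if s = "" then k :: rest else s :: pvPlaceFirstEmpty rest k

def sorted_keys_py (cd : List (String × List (String × Int))) : List String :=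
  let d := PySem.Dict.mk cd
  let init := List.replicate d.size ""          -- [""] * len(cd.keys())
  d.keys.foldl (fun slots k =>                  -- for k in cd:
    let ccd := (PySem.Dict.get? d k).getD []    -- ccd = cd[k]  (k comes from d, so present)
    let idx := PySem.Dict.getD (PySem.Dict.mk ccd) "index" 0
    if idx = 0 then pvPlaceFirstEmpty slots k
    else PySem.List.pySetD slots (idx - 1) k)   -- sorted_keys[idx-1] = k
    init

-- ===== PORT B =====
-- `while slots[free] != "": free += 1` — first empty slot at or after free (none = the
-- Python while running off the end, unreachable under Pre_)
def pvFindFree (slots : List String) (free : Nat) : Option Nat :=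
  if h : free < slots.length then
    if slots[free] = "" then some free else pvFindFree slots (free + 1)
  else none
termination_by slots.length - free

def pvStepB (st : List String × Nat) (p : String × List (String × Int)) :
    List String × Nat :=
  let idx := PySem.Dict.getD (PySem.Dict.mk p.2) "index" 0
  if idx = 0 then
    match pvFindFree st.1 st.2 with
    | some j => (st.1.set j p.1, j + 1)         -- slots[free] = k; free += 1
    | none => (st.1, st.1.length)               -- Python IndexError; unreachable under Pre_
  else
    (PySem.List.pySetD st.1 (idx - 1) p.1, st.2)  -- slots[idx - 1] = k

def sorted_keys_py_alt (cd : List (String × List (String × Int))) : List String :=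
  (cd.foldl pvStepB (List.replicate cd.length "", 0)).1

-- ===== PRECONDITION & SPEC =====
-- cd models a Python dict, so its keys are distinct; the empty string as a key is excluded
-- because it collides with A's empty-slot sentinel, making either placement there an
-- accidental corner (A returns ['a',''] on {'': {}, 'a': {}}, B returns ['','a']); and every
-- non-zero "index" value must put idx-1 inside Python's (negative-wrapping) list-index
-- range, else A raises IndexError.
def Pre_sorted_keys_py (cd : List (String × List (String × Int))) : Prop :=
  (cd.map Prod.fst).Nodup ∧
  (∀ p ∈ cd, p.1 ≠ "") ∧
  ∀ p ∈ cd,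
    PySem.Dict.getD (PySem.Dict.mk p.2) "index" 0 = 0 ∨
    (1 - (cd.length : Int) ≤ PySem.Dict.getD (PySem.Dict.mk p.2) "index" 0 ∧
      PySem.Dict.getD (PySem.Dict.mk p.2) "index" 0 ≤ (cd.length : Int))

instance (cd : List (String × List (String × Int))) : Decidable (Pre_sorted_keys_py cd) := by
  unfold Pre_sorted_keys_py; infer_instance

def pvWitness_sorted_keys_py : (List (String × List (String × Int))) :=
  [("a", [("index", 2)]), ("b", []), ("c", [("index", 1)])]

def Spec_sorted_keys_py (cd : List (String × List (String × Int))) (out : List String) : Prop := out = sorted_keys_py_alt cd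
instance (cd : List (String × List (String × Int))) (out : List String) : Decidable (Spec_sorted_keys_py cd out) := by unfold Spec_sorted_keys_py; infer_instance

-- ===== CLAIM (what is proved, stated in full; the proofs are below) =====
def Claim_equal_sorted_keys_py : Prop := ∀ (cd : List (String × List (String × Int))), Dom_sorted_keys_py cd → Pre_sorted_keys_py cd → Spec_sorted_keys_py cd (sorted_keys_py cd)

-- ===== LEMMAS AND PROOFS =====

theorem pySetD_neg {α : Type} (xs : List α) (i : Int) (v : α) (h0 : i < 0)
    (h1 : -(xs.length : Int) ≤ i) :
    PySem.List.pySetD xs i v = xs.set ((xs.length : Int) + i).toNat v := by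
  simp [PySem.List.pySetD, PySem.List.pySet?, PySem.List.pyIdx?]
  split_ifs with h2 h3
  · omega
  · omega
  · simp; congr 1; omega

theorem get?_mk_of_mem_nodup (cd : List (String × List (String × Int)))
    (hnd : (cd.map Prod.fst).Nodup) (p : String × List (String × Int)) (hp : p ∈ cd) :
    PySem.Dict.get? (PySem.Dict.mk cd) p.1 = some p.2 := by
  induction cd with
  | nil => cases hp
  | cons q rest ih =>
    simp only [List.map_cons, List.nodup_cons] at hnd
    rw [show (PySem.Dict.mk (q :: rest)) = { items := (q.1, q.2) :: rest } by rfl,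
      PySem.Dict.get?_mk_cons]
    rcases List.mem_cons.mp hp with hp | hp
    · subst hp; simp
    · have hne : q.1 ≠ p.1 := by
        intro h; exact hnd.1 (h ▸ List.mem_map_of_mem hp)
      rw [if_neg (by simpa using hne)]
      exact ih hnd.2 hp

-- invariant: the slots strictly left of `free` are all occupied
def pvInv (n : Nat) (slots : List String) (free : Nat) : Prop :=
  slots.length = n ∧ free ≤ n ∧ ∀ i, i < free → slots.getD i "" ≠ ""

theorem pvFindFree_cons (s : String) (rest : List String) (f : Nat) :
    pvFindFree (s :: rest) (f + 1) = (pvFindFree rest f).map (· + 1) := by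
  fun_induction pvFindFree rest f with
  | case1 f h h2 =>
    rw [pvFindFree]; simp only [List.length_cons]
    rw [dif_pos (by omega)]
    simp only [List.getElem_cons_succ]
    rw [if_pos h2]; simp
  | case2 f h h2 ih =>
    rw [pvFindFree]; simp only [List.length_cons]
    rw [dif_pos (by omega)]
    simp only [List.getElem_cons_succ]
    rw [if_neg h2]; exact ih
  | case3 f h =>
    rw [pvFindFree]; simp only [List.length_cons]
    rw [dif_neg (by omega)]; simp

theorem pvFindFree_zero_cons (s : String) (rest : List String) :
    pvFindFree (s :: rest) 0 =
      if s = "" then some 0 else (pvFindFree rest 0).map (· + 1) := by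
  rw [pvFindFree]
  rw [dif_pos (by simp)]
  simp only [List.getElem_cons_zero]
  split_ifs with h
  · rfl
  · exact pvFindFree_cons s rest 0

-- A's scan from 0 and B's scan from `free` agree when everything left of `free` is occupied
theorem place_eq_findFree (slots : List String) :
    ∀ (free : Nat) (k : String), (∀ i, i < free → slots.getD i "" ≠ "") →
    pvPlaceFirstEmpty slots k =
      (match pvFindFree slots free with
       | some j => slots.set j k
       | none => slots) := by
  induction slots with
  | nil => intro free k _; rw [pvFindFree]; simp [pvPlaceFirstEmpty]
  | cons s rest ih =>
    intro free k hpre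
    match free with
    | 0 =>
      rw [pvFindFree_zero_cons, pvPlaceFirstEmpty]
      split_ifs with h
      · simp
      · rw [ih 0 k (by intro i hi; omega)]
        cases hfr : pvFindFree rest 0 <;> simp
    | f + 1 =>
      have hs : s ≠ "" := by
        have := hpre 0 (by omega); simpa using this
      rw [pvFindFree_cons, pvPlaceFirstEmpty, if_neg hs]
      rw [ih f k (by intro i hi; have := hpre (i + 1) (by omega); simpa using this)]
      cases hfr : pvFindFree rest f <;> simp

theorem pvFindFree_some (slots : List String) :
    ∀ (free j : Nat), pvFindFree slots free = some j →
      free ≤ j ∧ j < slots.length ∧ slots.getD j "" = "" ∧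
        ∀ i, free ≤ i → i < j → slots.getD i "" ≠ "" := by
  intro free j h
  fun_induction pvFindFree slots free with
  | case1 f hf h2 =>
    rcases Option.some_inj.mp h with rfl
    refine ⟨le_refl _, hf, ?_, by intro i h1 h2; omega⟩
    rw [List.getD_eq_getElem?_getD, List.getElem?_eq_getElem hf]
    simpa using h2
  | case2 f hf h2 ih =>
    obtain ⟨ha, hb, hc, hd⟩ := ih h
    refine ⟨by omega, hb, hc, ?_⟩
    intro i hi1 hi2
    rcases Nat.eq_or_lt_of_le hi1 with rfl | hlt
    · rw [List.getD_eq_getElem?_getD, List.getElem?_eq_getElem hf]; simpa using h2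
    · exact hd i hlt hi2
  | case3 f hf => cases h

theorem pvFindFree_none (slots : List String) :
    ∀ (free : Nat), pvFindFree slots free = none →
      ∀ i, free ≤ i → i < slots.length → slots.getD i "" ≠ "" := by
  intro free h
  fun_induction pvFindFree slots free with
  | case1 f hf h2 => cases h
  | case2 f hf h2 ih =>
    intro i h1 hlen
    rcases Nat.eq_or_lt_of_le h1 with rfl | hlt
    · rw [List.getD_eq_getElem?_getD, List.getElem?_eq_getElem hf]; simpa using h2
    · exact ih h i hlt hlen
  | case3 f hf => intro i h1 h2; omega

theorem getD_set_ne (slots : List String) (j i : Nat) (v : String) (h : j ≠ i) :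
    (slots.set j v).getD i "" = slots.getD i "" := by
  rw [List.getD_eq_getElem?_getD, List.getElem?_set_ne h, ← List.getD_eq_getElem?_getD]

theorem getD_set_self (slots : List String) (j : Nat) (v : String) (h : j < slots.length) :
    (slots.set j v).getD j "" = v := by
  rw [List.getD_eq_getElem?_getD, List.getElem?_set_self h]; rfl

-- one parallel step: equal slots stay equal and the invariant is maintained
theorem step_eq (n : Nat) (slots : List String) (free : Nat)
    (p : String × List (String × Int)) (hinv : pvInv n slots free) (hk : p.1 ≠ "")
    (hrange : PySem.Dict.getD (PySem.Dict.mk p.2) "index" 0 = 0 ∨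
      (1 - (n : Int) ≤ PySem.Dict.getD (PySem.Dict.mk p.2) "index" 0 ∧
        PySem.Dict.getD (PySem.Dict.mk p.2) "index" 0 ≤ (n : Int))) :
    ((if PySem.Dict.getD (PySem.Dict.mk p.2) "index" 0 = 0 then pvPlaceFirstEmpty slots p.1
      else PySem.List.pySetD slots (PySem.Dict.getD (PySem.Dict.mk p.2) "index" 0 - 1) p.1)
        = (pvStepB (slots, free) p).1) ∧
    pvInv n (pvStepB (slots, free) p).1 (pvStepB (slots, free) p).2 := by
  obtain ⟨hlen, hfn, hocc⟩ := hinv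
  set idx := PySem.Dict.getD (PySem.Dict.mk p.2) "index" 0 with hidx
  by_cases h0 : idx = 0
  · -- first-empty branch
    rw [if_pos h0]
    cases hff : pvFindFree slots free with
    | some j =>
      obtain ⟨hfj, hjlen, hjempty, hmid⟩ := pvFindFree_some slots free j hff
      have hB : pvStepB (slots, free) p = (slots.set j p.1, j + 1) := by
        simp only [pvStepB, ← hidx, h0, if_pos, hff]
      rw [hB]
      refine ⟨?_, by simp [hlen], by omega, ?_⟩
      · rw [place_eq_findFree slots free p.1 hocc, hff]
      · dsimp only
        intro i hi
        by_cases hij : j = i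
        · subst hij
          rw [getD_set_self slots j p.1 hjlen]; exact hk
        · rw [getD_set_ne slots j i p.1 hij]
          by_cases hc : i < free
          · exact hocc i hc
          · exact hmid i (by omega) (by omega)
    | none =>
      -- A never reaches this case: an empty slot always exists for it to find; but if it
      -- did, both sides leave the slots unchanged
      have hB : pvStepB (slots, free) p = (slots, slots.length) := by
        simp only [pvStepB, ← hidx, h0, if_pos, hff]
      rw [hB]
      refine ⟨?_, hlen, by omega, ?_⟩
      · rw [place_eq_findFree slots free p.1 hocc, hff]
      · dsimp only
        intro i hi
        by_cases hc : i < free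
        · exact hocc i hc
        · exact pvFindFree_none slots free hff i (by omega) (by omega)
  · -- indexed branch
    rcases hrange with h | ⟨hlo, hhi⟩
    · exact absurd h h0
    rw [if_neg h0]
    have hB : pvStepB (slots, free) p =
        (PySem.List.pySetD slots (idx - 1) p.1, free) := by
      simp only [pvStepB, ← hidx, if_neg h0]
    rw [hB]
    set pos := (if 0 < idx then (idx - 1).toNat else ((n : Int) + idx - 1).toNat) with hposdef
    have hposlt : pos < n := by
      rw [hposdef]; split_ifs with hpos <;> omega
    have hset : PySem.List.pySetD slots (idx - 1) p.1 = slots.set pos p.1 := by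
      by_cases hpos : 0 < idx
      · rw [hposdef, if_pos hpos, PySem.List.pySetD_of_nonneg (xs := slots) (i := idx - 1) (v := p.1) (by omega)]
      · rw [hposdef, if_neg hpos,
          pySetD_neg slots (idx - 1) p.1 (by omega) (by rw [hlen]; omega)]
        congr 1; omega
    refine ⟨rfl, by simp [hset, hlen], hfn, ?_⟩
    dsimp only
    intro i hi
    rw [hset]
    by_cases hij : pos = i
    · subst hij
      rw [getD_set_self slots pos p.1 (by omega)]; exact hk
    · rw [getD_set_ne slots pos i p.1 hij]
      exact hocc i hi

theorem loop_eq (n : Nat) (l : List (String × List (String × Int)))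
    (hk : ∀ p ∈ l, p.1 ≠ "")
    (hr : ∀ p ∈ l, PySem.Dict.getD (PySem.Dict.mk p.2) "index" 0 = 0 ∨
      (1 - (n : Int) ≤ PySem.Dict.getD (PySem.Dict.mk p.2) "index" 0 ∧
        PySem.Dict.getD (PySem.Dict.mk p.2) "index" 0 ≤ (n : Int))) :
    ∀ (slots : List String) (free : Nat), pvInv n slots free →
    l.foldl (fun slots (p : String × List (String × Int)) =>
        let idx := PySem.Dict.getD (PySem.Dict.mk p.2) "index" 0
        if idx = 0 then pvPlaceFirstEmpty slots p.1
        else PySem.List.pySetD slots (idx - 1) p.1) slots =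
      (l.foldl pvStepB (slots, free)).1 := by
  induction l with
  | nil => intro slots free _; rfl
  | cons p rest ih =>
    intro slots free hinv
    obtain ⟨heq, hinv'⟩ := step_eq n slots free p hinv (hk p List.mem_cons_self)
      (hr p (List.mem_cons_self))
    simp only [List.foldl_cons]
    rw [heq]
    have := ih (fun q hq => hk q (List.mem_cons_of_mem _ hq))
      (fun q hq => hr q (List.mem_cons_of_mem _ hq))
      (pvStepB (slots, free) p).1 (pvStepB (slots, free) p).2 hinv'
    simpa using this

theorem keys_mk_eq (cd : List (String × List (String × Int))) :
    (PySem.Dict.mk cd).keys = cd.map Prod.fst := rfl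

theorem size_mk_eq (cd : List (String × List (String × Int))) :
    (PySem.Dict.mk cd).size = cd.length := by
  simp [PySem.Dict.size]

-- ===== VERDICT (by name: the statement is the Claim_ definition above) =====
theorem sorted_keys_py_spec : Claim_equal_sorted_keys_py := by
  intro cd _ hpre
  obtain ⟨hnd, hkeys, hrange⟩ := hpre
  unfold Spec_sorted_keys_py sorted_keys_py sorted_keys_py_alt
  simp only [keys_mk_eq, size_mk_eq, List.foldl_map]
  rw [PySem.List.foldl_congr_mem cd _
    (fun slots (p : String × List (String × Int)) =>
      let idx := PySem.Dict.getD (PySem.Dict.mk p.2) "index" 0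
      if idx = 0 then pvPlaceFirstEmpty slots p.1
      else PySem.List.pySetD slots (idx - 1) p.1)
    (List.replicate cd.length "")
    (by
      intro acc p hp
      rw [get?_mk_of_mem_nodup cd hnd p hp]
      rfl)]
  exact loop_eq cd.length cd hkeys hrange (List.replicate cd.length "") 0
    ⟨List.length_replicate, Nat.zero_le _, by intro i hi; omega⟩
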